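-- pv_equiv track=rewrite | github.com/xmavericks/LearnSqlWithPython | SQL_Joins/sql_inner_join_internal_work.py | return_inner_join_results
-- ===== SOURCE A (Python) =====
-- def return_inner_join_results(table_one, table_two):
--     """This method illustrates how INNER JOIN Works internally in SQL
--
--     Definition: Inner joins combine records from two tables whenever there are matching
--     values in a field common to both tables. You can use INNER JOIN with the
--     Departments and Employees tables to select all the employees in each department.
--     """
--     # INNER JOIN
--     data_list_table_one = []
--     data_list_table_two = []
--     for item in table_one:
--         for ele in table_two:
--             if item == ele and ele != 'null':
--                 data_list_table_one.append(ele)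
--                 data_list_table_two.append(ele)
--     items = {
--         "table_one_updated_result": data_list_table_one,
--         "table_two_updated_result": data_list_table_two
--     }
--
--     return items
-- ===== SOURCE B (Python) =====
-- def return_inner_join_results(table_one, table_two):
--     """Inner join via a one-pass count table of table_two's non-'null' values."""
--     counts = {}
--     for ele in table_two:
--         if ele != 'null':
--             counts[ele] = counts.get(ele, 0) + 1
--     joined = []
--     for item in table_one:
--         joined.extend([item] * counts.get(item, 0))
--     return {
--         "table_one_updated_result": joined,
--         "table_two_updated_result": joined
--     }
-- ===== Notes on version B (the rewrite author's own statement) =====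
-- stated objective: alternative
-- what changed: Replaces the nested scan of table_two for every item of table_one with a count table of table_two's non-null values built once, then emits each table_one item count times; O(n*m) comparisons become O(n+m), though on duplicate-heavy inputs both remain bounded by the (quadratic-sized) output list, so a timing run read only ~1.3x at the largest size.
import Mathlib
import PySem

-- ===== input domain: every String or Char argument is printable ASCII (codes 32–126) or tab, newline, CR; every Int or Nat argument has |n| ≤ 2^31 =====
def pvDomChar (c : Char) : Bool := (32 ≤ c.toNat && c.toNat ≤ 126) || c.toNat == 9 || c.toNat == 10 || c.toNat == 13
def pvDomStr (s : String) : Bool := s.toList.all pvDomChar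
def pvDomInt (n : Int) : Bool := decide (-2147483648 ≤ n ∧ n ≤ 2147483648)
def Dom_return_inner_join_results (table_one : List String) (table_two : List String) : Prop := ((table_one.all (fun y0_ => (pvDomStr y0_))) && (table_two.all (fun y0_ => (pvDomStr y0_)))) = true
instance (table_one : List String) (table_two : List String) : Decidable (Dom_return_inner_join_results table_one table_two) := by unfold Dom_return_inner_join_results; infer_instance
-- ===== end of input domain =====

-- B replaces A's rescans of table_two for every table_one item by a count table built once, emitting each item count times (fewer comparisons; overall time is output-bound, so not measured as faster).

-- ===== PORT A =====
-- literal port of A: nested loops growing two (identical) accumulator lists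
def return_inner_join_results (table_one : List String) (table_two : List String) : List (String × List String) :=
  let p : List String × List String :=
    table_one.foldl (fun st item =>
      table_two.foldl (fun st ele =>
        if item = ele ∧ ele ≠ "null" then (st.1 ++ [ele], st.2 ++ [ele]) else st) st)
      ([], [])
  [("table_one_updated_result", p.1), ("table_two_updated_result", p.2)]

-- ===== PORT B =====
-- literal port of Source B: one pass building a count dict, one pass emitting each item count times
def return_inner_join_results_alt (table_one : List String) (table_two : List String) : List (String × List String) :=
  let counts : PySem.Dict String Int :=
    table_two.foldl (fun d ele =>
      if ele ≠ "null" then d.insert ele (d.getD ele 0 + 1) else d) PySem.Dict.empty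
  let joined : List String :=
    table_one.foldl (fun acc item => acc ++ List.replicate (counts.getD item 0).toNat item) []
  [("table_one_updated_result", joined), ("table_two_updated_result", joined)]

-- ===== PRECONDITION & SPEC =====
def Spec_return_inner_join_results (table_one : List String) (table_two : List String) (out : List (String × List String)) : Prop := out = return_inner_join_results_alt table_one table_two
instance (table_one : List String) (table_two : List String) (out : List (String × List String)) : Decidable (Spec_return_inner_join_results table_one table_two out) := by unfold Spec_return_inner_join_results; infer_instance

-- ===== CLAIM (what is proved, stated in full; the proofs are below) =====
def Claim_equal_return_inner_join_results : Prop := ∀ (table_one : List String) (table_two : List String), Dom_return_inner_join_results table_one table_two → Spec_return_inner_join_results table_one table_two (return_inner_join_results table_one table_two)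

-- ===== LEMMAS AND PROOFS =====

-- the number of copies of `item` both programs emit per table_one entry
def pvK (item : String) (t2 : List String) : Nat :=
  (t2.filter (fun e => e ≠ "null")).count item

-- B's conditional count fold yields exactly pvK for every key
lemma counts_getD (t2 : List String) (item : String) :
    ((t2.foldl (fun d ele => if ele ≠ "null" then d.insert ele (d.getD ele 0 + 1) else d)
        (PySem.Dict.empty : PySem.Dict String Int)).getD item 0) = (pvK item t2 : Int) := by
  have h : ∀ (l : List String) (d : PySem.Dict String Int),
      (l.foldl (fun d ele => if ele ≠ "null" then d.insert ele (d.getD ele 0 + 1) else d) d)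
        = (l.filter (fun e => e ≠ "null")).foldl (fun d ele => d.insert ele (d.getD ele 0 + 1)) d := by
    intro l
    induction l with
    | nil => intro d; rfl
    | cons e t ih =>
      intro d
      by_cases he : e = "null"
      · simpa [List.foldl_cons, List.filter_cons, he] using ih d
      · simpa [List.foldl_cons, List.filter_cons, he] using ih (d.insert e (d.getD e 0 + 1))
  rw [h, PySem.Dict.getD_foldl_insert_add_one]
  simp [pvK]

-- A's inner loop over table_two appends pvK copies of item to both accumulators
lemma inner_loop_eq (item : String) (t2 : List String) (a b : List String) :
    t2.foldl (fun st ele =>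
        if item = ele ∧ ele ≠ "null" then (st.1 ++ [ele], st.2 ++ [ele]) else st) (a, b)
      = (a ++ List.replicate (pvK item t2) item, b ++ List.replicate (pvK item t2) item) := by
  induction t2 generalizing a b with
  | nil => simp [pvK]
  | cons e t ih =>
    by_cases he : e = "null"
    · have hk : pvK item (e :: t) = pvK item t := by simp [pvK, List.filter_cons, he]
      subst he
      rw [List.foldl_cons, if_neg (by simp), ih, hk]
    · by_cases hi : item = e
      · have hk : pvK item (e :: t) = pvK item t + 1 := by
          simp [pvK, List.filter_cons, he, List.count_cons, hi]
        subst hi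
        rw [List.foldl_cons, if_pos ⟨rfl, he⟩, ih, hk]
        simp [List.append_assoc, List.replicate_succ]
      · have hk : pvK item (e :: t) = pvK item t := by
          unfold pvK
          rw [List.filter_cons, if_pos (by simp [he]), List.count_cons]
          simp
          exact fun h => hi h.symm
        have hif : ¬ (item = e ∧ e ≠ "null") := fun h => hi h.1
        rw [List.foldl_cons, if_neg hif, ih, hk]

-- A's outer loop computes the pair (J, J) where J is the flat join list
lemma outer_loop_eq (t1 t2 : List String) (a b : List String) :
    t1.foldl (fun st item =>
        t2.foldl (fun st ele =>
          if item = ele ∧ ele ≠ "null" then (st.1 ++ [ele], st.2 ++ [ele]) else st) st) (a, b)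
      = (t1.foldl (fun acc item => acc ++ List.replicate (pvK item t2) item) a,
         t1.foldl (fun acc item => acc ++ List.replicate (pvK item t2) item) b) := by
  induction t1 generalizing a b with
  | nil => rfl
  | cons x t ih => simp [List.foldl_cons, inner_loop_eq, ih]

-- ===== VERDICT (by name: the statement is the Claim_ definition above) =====
theorem return_inner_join_results_spec : Claim_equal_return_inner_join_results := by
  intro t1 t2 _
  show return_inner_join_results t1 t2 = return_inner_join_results_alt t1 t2
  unfold return_inner_join_results return_inner_join_results_alt
  simp only [outer_loop_eq, counts_getD, Int.toNat_natCast]
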